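-- pv_equiv track=rewrite | github.com/artiks12/Subtitles | SubtitleTranslator/Caption.py | bracketCount
-- ===== SOURCE A (Python) =====
-- def bracketCount(lst):
--     bracketsBuffer = {
--         "(" : 0,
--         "{" : 0,
--         "[" : 0
--     }
--     for row in lst:
--         for elem in row:
--             if elem == '(':
--                 bracketsBuffer['('] += 1
--             elif elem == '{':
--                 bracketsBuffer['{'] += 1
--             elif elem == '[':
--                 bracketsBuffer['['] += 1
--             elif elem == ')':
--                 bracketsBuffer['('] -= 1
--             elif elem == '}':
--                 bracketsBuffer['{'] -= 1
--             elif elem == ']':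
--                 bracketsBuffer['['] -= 1
--     for b in bracketsBuffer.values():
--         if not(b == 0):
--             return False
--     return True
-- ===== SOURCE B (Python) =====
-- def bracketCount(lst):
--     def total(ch):
--         return sum(row.count(ch) for row in lst)
--     return all(total(o) == total(c) for o, c in (("(", ")"), ("{", "}"), ("[", "]")))
-- ===== Notes on version B (the rewrite author's own statement) =====
-- stated objective: idiomatic
-- what changed: Replaces the single running-balance character loop (signed per-type balances checked for zero at the end) with six staged passes using the str.count builtin, summed per row and compared as paired opener/closer totals via all().
import Mathlib
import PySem

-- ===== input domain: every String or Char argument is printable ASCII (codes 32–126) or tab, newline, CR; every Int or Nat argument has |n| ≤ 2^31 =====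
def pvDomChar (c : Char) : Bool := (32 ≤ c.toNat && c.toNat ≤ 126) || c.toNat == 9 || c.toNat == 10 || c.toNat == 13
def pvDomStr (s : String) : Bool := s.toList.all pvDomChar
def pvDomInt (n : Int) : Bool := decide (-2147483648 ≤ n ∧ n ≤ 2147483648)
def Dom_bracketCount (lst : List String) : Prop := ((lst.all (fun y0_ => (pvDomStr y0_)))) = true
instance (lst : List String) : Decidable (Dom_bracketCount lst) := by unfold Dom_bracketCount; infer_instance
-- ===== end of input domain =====

-- B (idiomatic): replaces A's single running-balance character loop and final zero-check loop
-- with six staged str.count passes, summed per row and compared as paired opener/closer totals.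

-- ===== PORT A =====
-- step of A's inner loop: running balances for '(', '{', '['
def pvStepA (s : Int × Int × Int) (c : Char) : Int × Int × Int :=
  if c = '(' then (s.1 + 1, s.2.1, s.2.2)
  else if c = '{' then (s.1, s.2.1 + 1, s.2.2)
  else if c = '[' then (s.1, s.2.1, s.2.2 + 1)
  else if c = ')' then (s.1 - 1, s.2.1, s.2.2)
  else if c = '}' then (s.1, s.2.1 - 1, s.2.2)
  else if c = ']' then (s.1, s.2.1, s.2.2 - 1)
  else s

def bracketCount (lst : List String) : Bool :=
  let st := lst.foldl (fun s row => row.toList.foldl pvStepA s) (0, 0, 0)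
  st.1 == 0 && st.2.1 == 0 && st.2.2 == 0

-- ===== PORT B =====
-- B's helper total(ch): sum of row.count(ch) over the rows (str.count → PySem.Str.count)
def pvTotal (lst : List String) (ch : String) : Nat :=
  (lst.map (fun row => PySem.Str.count row ch)).sum

-- B: all(total(o) == total(c) for the three opener/closer pairs)
def bracketCount_alt (lst : List String) : Bool :=
  [("(", ")"), ("{", "}"), ("[", "]")].all
    (fun p => pvTotal lst p.1 == pvTotal lst p.2)

-- ===== PRECONDITION & SPEC =====
def Spec_bracketCount (lst : List String) (out : Bool) : Prop := out = bracketCount_alt lst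
instance (lst : List String) (out : Bool) : Decidable (Spec_bracketCount lst out) := by unfold Spec_bracketCount; infer_instance

-- ===== CLAIM (what is proved, stated in full; the proofs are below) =====
def Claim_equal_bracketCount : Prop := ∀ (lst : List String), Dom_bracketCount lst → Spec_bracketCount lst (bracketCount lst)

-- ===== LEMMAS AND PROOFS =====

-- A's inner loop computes the three signed bracket balances of the character list
lemma pvStepA_foldl (cs : List Char) (s : Int × Int × Int) :
    cs.foldl pvStepA s =
      (s.1 + cs.count '(' - cs.count ')',
       s.2.1 + cs.count '{' - cs.count '}',
       s.2.2 + cs.count '[' - cs.count ']') := by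
  induction cs generalizing s with
  | nil => simp
  | cons c cs ih =>
    simp only [List.foldl_cons, ih, List.count_cons, pvStepA]
    clear ih
    split_ifs with h1 h2 h3 h4 h5 h6 <;> subst_vars <;> simp_all <;> ring

-- str.count with a one-character needle counts occurrences of that character
lemma count_go_single (c : Char) : ∀ (fuel : Nat) (l : List Char) (acc : Nat),
    l.length ≤ fuel → PySem.Chars.count.go [c] fuel l acc = acc + l.count c := by
  intro fuel
  induction fuel with
  | zero =>
    intro l acc h
    have : l = [] := List.eq_nil_of_length_eq_zero (Nat.le_zero.mp h)
    subst this; simp [PySem.Chars.count.go]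
  | succ n ih =>
    intro l acc h
    cases l with
    | nil => simp [PySem.Chars.count.go]
    | cons x t =>
      simp only [PySem.Chars.count.go]
      by_cases hx : c = x
      · subst hx
        have hp : [c].isPrefixOf (c :: t) = true := by simp [List.isPrefixOf]
        rw [if_pos hp]
        simp only [List.length_singleton, List.drop_succ_cons, List.drop_zero]
        rw [ih t (acc + 1) (by simpa using Nat.le_of_succ_le_succ h)]
        simp
        omega
      · have hp : [c].isPrefixOf (x :: t) = false := by
          simp [List.isPrefixOf, hx]
        rw [if_neg (by simp [hp])]
        rw [ih t acc (by simpa using Nat.le_of_succ_le_succ h)]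
        simp [Ne.symm hx]

lemma chars_count_single (cs : List Char) (c : Char) :
    PySem.Chars.count cs [c] = cs.count c := by
  rw [PySem.Chars.count, if_neg (by simp)]
  simpa using count_go_single c cs.length cs 0 le_rfl

-- B's total(ch) over the rows is the count of ch in the flattened character stream
lemma pvTotal_eq_flatten_count (lst : List String) (s : String) (c : Char)
    (hs : s.toList = [c]) :
    pvTotal lst s = ((lst.map String.toList).flatten).count c := by
  unfold pvTotal
  rw [List.count_flatten, List.map_map]
  congr 1
  apply List.map_congr_left
  intro row _
  simp only [Function.comp]
  rw [PySem.Str.count_eq, hs]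
  exact chars_count_single row.toList c

-- ===== VERDICT (by name: the statement is the Claim_ definition above) =====
theorem bracketCount_spec : Claim_equal_bracketCount := by
  intro lst _
  unfold Spec_bracketCount bracketCount bracketCount_alt
  have h : List.foldl (fun s row => (String.toList row).foldl pvStepA s) ((0:Int), (0:Int), (0:Int)) lst
      = ((lst.map String.toList).flatten).foldl pvStepA (0, 0, 0) := by
    rw [List.foldl_flatten, List.foldl_map]
  have key : ∀ (x y : Nat), (((x : Int) - (y : Int)) == 0) = (x == y) := by
    intro x y
    rw [Bool.eq_iff_iff]
    simp only [beq_iff_eq]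
    omega
  rw [h, pvStepA_foldl]
  simp only [List.all_cons, List.all_nil, Bool.and_true]
  rw [pvTotal_eq_flatten_count lst "(" '(' rfl, pvTotal_eq_flatten_count lst ")" ')' rfl,
      pvTotal_eq_flatten_count lst "{" '{' rfl, pvTotal_eq_flatten_count lst "}" '}' rfl,
      pvTotal_eq_flatten_count lst "[" '[' rfl, pvTotal_eq_flatten_count lst "]" ']' rfl]
  simp only [zero_add, key]
  rw [Bool.and_assoc]
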